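-- pv_equiv track=rewrite | github.com/thiagobeboostup/Campanas-Meta-Creator | backend/services/utm_builder.py | preview_utm_url
-- ===== SOURCE A (Python) =====
-- def preview_utm_url(base_url: str, url_tags: str) -> str:
--     """Generate a preview URL showing how UTMs will look (with example values)."""
--     preview_replacements = {
--         "{{placement}}": "ig_stories",
--         "{{campaign.name}}": "SALES_CBO_SummerPromo_20260325",
--         "{{adset.name}}": "SumPro_US-25-45_A",
--         "{{ad.name}}": "SumPro-A_hero-video_sq_v1",
--     }
--
--     preview_tags = url_tags
--     for macro, example in preview_replacements.items():
--         preview_tags = preview_tags.replace(macro, example)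
--
--     separator = "&" if "?" in base_url else "?"
--     return f"{base_url}{separator}{preview_tags}"
-- ===== SOURCE B (Python) =====
-- _PREVIEW_EXAMPLES = [
--     ("{{placement}}", "ig_stories"),
--     ("{{campaign.name}}", "SALES_CBO_SummerPromo_20260325"),
--     ("{{adset.name}}", "SumPro_US-25-45_A"),
--     ("{{ad.name}}", "SumPro-A_hero-video_sq_v1"),
-- ]
--
--
-- def preview_utm_url(base_url: str, url_tags: str) -> str:
--     """Generate a preview URL showing how UTMs will look (with example values)."""
--     # Single left-to-right pass over url_tags: at each position emit the example
--     # value of the first macro that matches there, otherwise copy one character.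
--     pieces = []
--     i = 0
--     while i < len(url_tags):
--         for macro, example in _PREVIEW_EXAMPLES:
--             if url_tags.startswith(macro, i):
--                 pieces.append(example)
--                 i += len(macro)
--                 break
--         else:
--             pieces.append(url_tags[i])
--             i += 1
--     tags = "".join(pieces)
--     if "?" in base_url:
--         return base_url + "&" + tags
--     return base_url + "?" + tags
-- ===== Notes on version B (the rewrite author's own statement) =====
-- stated objective: alternative
-- what changed: A runs four sequential full str.replace passes (one per macro); B makes a single left-to-right scan that at each position substitutes the first matching macro from the table, building the result in one pass.
import Mathlib
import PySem

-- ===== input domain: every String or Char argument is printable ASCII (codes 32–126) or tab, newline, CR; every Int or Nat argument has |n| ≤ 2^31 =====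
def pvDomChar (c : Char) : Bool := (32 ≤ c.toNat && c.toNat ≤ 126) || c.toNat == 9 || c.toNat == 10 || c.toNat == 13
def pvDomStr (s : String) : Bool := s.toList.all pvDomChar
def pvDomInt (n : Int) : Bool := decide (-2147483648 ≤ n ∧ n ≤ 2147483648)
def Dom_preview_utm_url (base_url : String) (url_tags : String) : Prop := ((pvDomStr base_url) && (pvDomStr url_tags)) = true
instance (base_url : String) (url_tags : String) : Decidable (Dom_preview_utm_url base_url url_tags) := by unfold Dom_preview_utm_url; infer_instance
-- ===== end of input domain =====

-- B replaces A's four sequential str.replace passes by one left-to-right scan that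
-- substitutes the first matching macro at each position (alternative algorithm, same result).


-- ===== PORT A =====
-- the dict of preview replacements, in insertion order
def pvReps : List (String × String) :=
  [("{{placement}}", "ig_stories"),
   ("{{campaign.name}}", "SALES_CBO_SummerPromo_20260325"),
   ("{{adset.name}}", "SumPro_US-25-45_A"),
   ("{{ad.name}}", "SumPro-A_hero-video_sq_v1")]

def preview_utm_url (base_url : String) (url_tags : String) : String :=
  -- for macro, example in preview_replacements.items(): preview_tags = preview_tags.replace(macro, example)
  let preview_tags := pvReps.foldl (fun acc p => PySem.Str.replace acc p.1 p.2) url_tags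
  let separator := if PySem.Str.isIn "?" base_url then "&" else "?"
  base_url ++ separator ++ preview_tags

-- ===== PORT B =====
def pvK1 : List Char := ['{', '{', 'p', 'l', 'a', 'c', 'e', 'm', 'e', 'n', 't', '}', '}']
def pvV1 : List Char := ['i', 'g', '_', 's', 't', 'o', 'r', 'i', 'e', 's']
def pvK2 : List Char := ['{', '{', 'c', 'a', 'm', 'p', 'a', 'i', 'g', 'n', '.', 'n', 'a', 'm', 'e', '}', '}']
def pvV2 : List Char := ['S', 'A', 'L', 'E', 'S', '_', 'C', 'B', 'O', '_', 'S', 'u', 'm', 'm', 'e', 'r', 'P', 'r', 'o', 'm', 'o', '_', '2', '0', '2', '6', '0', '3', '2', '5']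
def pvK3 : List Char := ['{', '{', 'a', 'd', 's', 'e', 't', '.', 'n', 'a', 'm', 'e', '}', '}']
def pvV3 : List Char := ['S', 'u', 'm', 'P', 'r', 'o', '_', 'U', 'S', '-', '2', '5', '-', '4', '5', '_', 'A']
def pvK4 : List Char := ['{', '{', 'a', 'd', '.', 'n', 'a', 'm', 'e', '}', '}']
def pvV4 : List Char := ['S', 'u', 'm', 'P', 'r', 'o', '-', 'A', '_', 'h', 'e', 'r', 'o', '-', 'v', 'i', 'd', 'e', 'o', '_', 's', 'q', '_', 'v', '1']

-- the while-loop of Source B: at each position substitute the first matching macro, else copy one char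
def pvSubst : List Char → List Char
  | [] => []
  | c :: t =>
    if pvK1.isPrefixOf (c :: t) then pvV1 ++ pvSubst ((c :: t).drop pvK1.length)
    else if pvK2.isPrefixOf (c :: t) then pvV2 ++ pvSubst ((c :: t).drop pvK2.length)
    else if pvK3.isPrefixOf (c :: t) then pvV3 ++ pvSubst ((c :: t).drop pvK3.length)
    else if pvK4.isPrefixOf (c :: t) then pvV4 ++ pvSubst ((c :: t).drop pvK4.length)
    else c :: pvSubst t
  termination_by l => l.length
  decreasing_by all_goals (simp [pvK1, pvK2, pvK3, pvK4]; try omega)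

def preview_utm_url_alt (base_url : String) (url_tags : String) : String :=
  let preview_tags := String.ofList (pvSubst url_tags.toList)
  let separator := if PySem.Str.isIn "?" base_url then "&" else "?"
  base_url ++ separator ++ preview_tags

-- ===== PRECONDITION & SPEC =====
def Spec_preview_utm_url (base_url : String) (url_tags : String) (out : String) : Prop := out = preview_utm_url_alt base_url url_tags
instance (base_url : String) (url_tags : String) (out : String) : Decidable (Spec_preview_utm_url base_url url_tags out) := by unfold Spec_preview_utm_url; infer_instance

-- ===== CLAIM (what is proved, stated in full; the proofs are below) =====
def Claim_equal_preview_utm_url : Prop := ∀ (base_url : String) (url_tags : String), Dom_preview_utm_url base_url url_tags → Spec_preview_utm_url base_url url_tags (preview_utm_url base_url url_tags)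

-- ===== LEMMAS AND PROOFS =====

-- A key is stored head-and-tail so that each match provably consumes at least one character.
def pvKey (p : (Char × List Char) × List Char) : List Char := p.1.1 :: p.1.2

-- simultaneous first-match scan with a list of (key, value) pairs
def pvScanL (reps : List ((Char × List Char) × List Char)) : List Char → List Char
  | [] => []
  | c :: t =>
    match reps.find? (fun p => (pvKey p).isPrefixOf (c :: t)) with
    | some p => p.2 ++ pvScanL reps ((c :: t).drop (pvKey p).length)
    | none => c :: pvScanL reps t
  termination_by l => l.length
  decreasing_by all_goals (simp [pvKey]; try omega)

def pvP1 : (Char × List Char) × List Char := (('{', pvK1.tail), pvV1)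
def pvP2 : (Char × List Char) × List Char := (('{', pvK2.tail), pvV2)
def pvP3 : (Char × List Char) × List Char := (('{', pvK3.tail), pvV3)
def pvP4 : (Char × List Char) × List Char := (('{', pvK4.tail), pvV4)

-- "w and z disagree at some position below both lengths" (symmetric)
def pvMis (w z : List Char) : Bool := (List.range (min w.length z.length)).any (fun n => w[n]? != z[n]?)

lemma pvMis_not_prefix {w z : List Char} (h : pvMis w z = true) (X : List Char) : ¬ w <+: (z ++ X) := by
  intro hpre
  unfold pvMis at h
  rw [List.any_eq_true] at h
  obtain ⟨n, hn, hne⟩ := h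
  rw [List.mem_range] at hn
  obtain ⟨r, hr⟩ := hpre
  have h1 : (w ++ r)[n]? = w[n]? := List.getElem?_append_left (by omega)
  have h2 : (z ++ X)[n]? = z[n]? := List.getElem?_append_left (by omega)
  rw [hr, h2] at h1
  simp [h1] at hne

lemma pvScanL_nil (reps : List ((Char × List Char) × List Char)) : pvScanL reps [] = [] := by
  simp [pvScanL]

lemma pvScanL_cons_some (reps : List ((Char × List Char) × List Char)) (c : Char) (t : List Char)
    (p : (Char × List Char) × List Char)
    (h : reps.find? (fun p => (pvKey p).isPrefixOf (c :: t)) = some p) :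
    pvScanL reps (c :: t) = p.2 ++ pvScanL reps ((c :: t).drop (pvKey p).length) := by
  rw [pvScanL]; rw [h]

lemma pvScanL_cons_none (reps : List ((Char × List Char) × List Char)) (c : Char) (t : List Char)
    (h : reps.find? (fun p => (pvKey p).isPrefixOf (c :: t)) = none) :
    pvScanL reps (c :: t) = c :: pvScanL reps t := by
  rw [pvScanL]; rw [h]

-- the copy lemma: a scan whose keys and values all clash with every nonempty suffix of K
-- neither creates nor destroys a prefix occurrence of any nonempty suffix of K
lemma pvScanL_copy (reps : List ((Char × List Char) × List Char)) (K : List Char)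
    (h3 : ∀ p' ∈ reps, ∀ w, w <:+ K → w ≠ [] → pvMis w (pvKey p') = true ∧ pvMis w p'.2 = true) :
    ∀ u w, w ≠ [] → w <:+ K → (w.isPrefixOf (pvScanL reps u) = w.isPrefixOf u) := by
  have main : ∀ n (u : List Char), u.length ≤ n →
      ∀ w, w ≠ [] → w <:+ K → (w.isPrefixOf (pvScanL reps u) = w.isPrefixOf u) := by
    intro n
    induction n with
    | zero =>
      intro u hu w hw hsuf
      have hnil : u = [] := List.eq_nil_of_length_eq_zero (by omega)
      subst hnil; rw [pvScanL_nil]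
    | succ n ih =>
      intro u hu w hw hsuf
      match u with
      | [] => rw [pvScanL_nil]
      | c :: t =>
        cases hf : reps.find? (fun p => (pvKey p).isPrefixOf (c :: t)) with
        | some p =>
          rw [pvScanL_cons_some _ _ _ _ hf]
          have hmem := List.mem_of_find?_eq_some hf
          have hpred := List.find?_some hf
          have hmis := h3 p hmem w hsuf hw
          obtain ⟨rest, hrest⟩ := List.isPrefixOf_iff_prefix.mp hpred
          have l1 : w.isPrefixOf (p.2 ++ pvScanL reps ((c :: t).drop (pvKey p).length)) = false := by
            rw [Bool.eq_false_iff, ne_eq, List.isPrefixOf_iff_prefix]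
            exact pvMis_not_prefix hmis.2 _
          have l2 : w.isPrefixOf (c :: t) = false := by
            rw [Bool.eq_false_iff, ne_eq, List.isPrefixOf_iff_prefix, ← hrest]
            exact pvMis_not_prefix hmis.1 _
          rw [l1, l2]
        | none =>
          rw [pvScanL_cons_none _ _ _ hf]
          match w with
          | d :: w' =>
            show (d == c && w'.isPrefixOf (pvScanL reps t)) = (d == c && w'.isPrefixOf t)
            match w' with
            | [] => simp [List.isPrefixOf]
            | e :: w'' =>
              have hsuf' : (e :: w'') <:+ K := (List.suffix_cons d _).trans hsuf
              rw [ih t (by simpa using hu) (e :: w'') (by simp) hsuf']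
  intro u; exact main u.length u le_rfl

-- a scan passes unchanged over a prefix none of whose nonempty suffixes starts a key match
lemma pvScanL_pass (reps : List ((Char × List Char) × List Char)) :
    ∀ (pre X : List Char),
      (∀ q, q <:+ pre → q ≠ [] → ∀ p' ∈ reps, ¬ (pvKey p') <+: (q ++ X)) →
      pvScanL reps (pre ++ X) = pre ++ pvScanL reps X := by
  intro pre
  induction pre with
  | nil => intro X _; simp
  | cons c pr ih =>
    intro X h
    have hnone : reps.find? (fun p => (pvKey p).isPrefixOf (c :: (pr ++ X))) = none := by
      rw [List.find?_eq_none]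
      intro p' hp'
      simp only [List.isPrefixOf_iff_prefix]
      exact h (c :: pr) (List.suffix_refl _) (by simp) p' hp'
    rw [List.cons_append, pvScanL_cons_none _ _ _ hnone,
      ih X (fun q hq hne => h q (hq.trans (List.suffix_cons c pr)) hne), List.cons_append]

-- appending one more (key, value) pair to the scan = running the single-key scan afterwards
lemma pvScanL_step (reps : List ((Char × List Char) × List Char)) (p : (Char × List Char) × List Char)
    (h3 : ∀ p' ∈ reps, ∀ w, w <:+ pvKey p → w ≠ [] → pvMis w (pvKey p') = true ∧ pvMis w p'.2 = true)
    (hpv : ∀ p' ∈ reps, ∀ q, q <:+ p'.2 → q ≠ [] → pvMis (pvKey p) q = true)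
    (hpk : ∀ q, q <:+ pvKey p → q ≠ [] → ∀ p' ∈ reps, pvMis (pvKey p') q = true) :
    ∀ s, pvScanL [p] (pvScanL reps s) = pvScanL (reps ++ [p]) s := by
  have main : ∀ n (s : List Char), s.length ≤ n →
      pvScanL [p] (pvScanL reps s) = pvScanL (reps ++ [p]) s := by
    intro n
    induction n with
    | zero =>
      intro s hs
      have hnil : s = [] := List.eq_nil_of_length_eq_zero (by omega)
      subst hnil; rw [pvScanL_nil, pvScanL_nil, pvScanL_nil]
    | succ n ih =>
      intro s hs
      match s with
      | [] => rw [pvScanL_nil, pvScanL_nil, pvScanL_nil]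
      | c :: t =>
        cases hf : reps.find? (fun q => (pvKey q).isPrefixOf (c :: t)) with
        | some p' =>
          rw [pvScanL_cons_some _ _ _ _ hf]
          have hmem := List.mem_of_find?_eq_some hf
          -- the single-key scan passes over the inserted value p'.2
          have hpass : pvScanL [p] (p'.2 ++ pvScanL reps ((c :: t).drop (pvKey p').length)) =
              p'.2 ++ pvScanL [p] (pvScanL reps ((c :: t).drop (pvKey p').length)) := by
            apply pvScanL_pass
            intro q hq hne p'' hp''
            rw [List.mem_singleton] at hp''; subst hp''
            exact pvMis_not_prefix (hpv p' hmem q hq hne) _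
          have hdrop : ((c :: t).drop (pvKey p').length).length ≤ n := by
            simp only [List.length_drop]
            have : 1 ≤ (pvKey p').length := by simp [pvKey]
            simp at hs ⊢; omega
          have hfapp : (reps ++ [p]).find? (fun q => (pvKey q).isPrefixOf (c :: t)) = some p' := by
            rw [List.find?_append, hf]; rfl
          rw [hpass, ih _ hdrop, pvScanL_cons_some _ _ _ _ hfapp]
        | none =>
          have hreps_none : ∀ p' ∈ reps, ¬ ((pvKey p').isPrefixOf (c :: t) = true) := by
            rw [← List.find?_eq_none]; exact hf
          by_cases hK : (pvKey p).isPrefixOf (c :: t) = true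
          · -- p's key matches the head: both sides substitute p.2
            obtain ⟨rest, hrest⟩ := List.isPrefixOf_iff_prefix.mp hK
            -- reps passes over the key pvKey p
            have hpassk : pvScanL reps (c :: t) = pvKey p ++ pvScanL reps rest := by
              rw [← hrest]
              apply pvScanL_pass
              intro q hq hne p' hp'
              exact pvMis_not_prefix (hpk q hq hne p' hp') _
            have hone : pvScanL [p] (pvKey p ++ pvScanL reps rest) =
                p.2 ++ pvScanL [p] (pvScanL reps rest) := by
              have : pvKey p ++ pvScanL reps rest = p.1.1 :: (p.1.2 ++ pvScanL reps rest) := by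
                simp [pvKey]
              rw [this, pvScanL_cons_some _ _ _ p (by
                simp only [List.find?_cons]
                have : (pvKey p).isPrefixOf (p.1.1 :: (p.1.2 ++ pvScanL reps rest)) = true := by
                  rw [List.isPrefixOf_iff_prefix]
                  exact ⟨pvScanL reps rest, by simp [pvKey]⟩
                rw [this])]
              congr 1
              have : p.1.1 :: (p.1.2 ++ pvScanL reps rest) = pvKey p ++ pvScanL reps rest := by
                simp [pvKey]
              rw [this, List.drop_left]
            have hrlen : rest.length ≤ n := by
              have := congrArg List.length hrest
              simp [pvKey] at this hs ⊢; omega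
            have hfapp : (reps ++ [p]).find? (fun q => (pvKey q).isPrefixOf (c :: t)) = some p := by
              rw [List.find?_append, hf]; simp [List.find?, hK]
            rw [hpassk, hone, ih rest hrlen, pvScanL_cons_some _ _ _ _ hfapp]
            congr 1
            rw [← hrest, List.drop_left]
          · -- nobody matches: both sides copy one character
            rw [pvScanL_cons_none _ _ _ hf]
            have hcopy : (pvKey p).isPrefixOf (c :: pvScanL reps t) = (pvKey p).isPrefixOf (c :: t) := by
              have h1 : c :: pvScanL reps t = pvScanL reps (c :: t) :=
                (pvScanL_cons_none _ _ _ hf).symm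
              rw [h1]
              exact pvScanL_copy reps (pvKey p) h3 (c :: t) (pvKey p) (by simp [pvKey])
                (List.suffix_refl _)
            have hone : [p].find? (fun q => (pvKey q).isPrefixOf (c :: pvScanL reps t)) = none := by
              simp only [List.find?_cons]
              rw [hcopy]
              simp only [Bool.not_eq_true] at hK
              rw [hK]; rfl
            have happ : (reps ++ [p]).find? (fun q => (pvKey q).isPrefixOf (c :: t)) = none := by
              rw [List.find?_append, hf]
              simp only [Bool.not_eq_true] at hK
              simp [List.find?, hK]
            rw [pvScanL_cons_none _ _ _ hone, ih t (by simpa using hs),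
              pvScanL_cons_none _ _ _ happ]
  intro s; exact main s.length s le_rfl

-- PySem's replace (nonempty pattern) is the single-key scan
lemma pvReplace_eq_scan (h : Char) (tl new : List Char) :
    ∀ s, PySem.Chars.replace s (h :: tl) new = pvScanL [((h, tl), new)] s := by
  have hgo : ∀ (fuel : Nat) (l acc : List Char), l.length ≤ fuel →
      PySem.Chars.replace.go (h :: tl) new fuel l acc
        = acc.reverse ++ pvScanL [((h, tl), new)] l := by
    intro fuel
    induction fuel with
    | zero =>
      intro l acc hl
      have hnil : l = [] := List.eq_nil_of_length_eq_zero (by omega)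
      subst hnil
      rw [pvScanL_nil]
      simp [PySem.Chars.replace.go]
    | succ n ih =>
      intro l acc hl
      match l with
      | [] => rw [pvScanL_nil]; simp [PySem.Chars.replace.go]
      | c :: t =>
        by_cases hp : (h :: tl).isPrefixOf (c :: t) = true
        · have hstep : PySem.Chars.replace.go (h :: tl) new (n+1) (c :: t) acc
              = PySem.Chars.replace.go (h :: tl) new n (List.drop (h :: tl).length (c :: t))
                  (new.reverse ++ acc) := by
            rw [PySem.Chars.replace.go, hp]; simp
          have hlen : (List.drop (h :: tl).length (c :: t)).length ≤ n := by
            simp at hl ⊢; omega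
          have hfind : ([((h, tl), new)]).find? (fun q => (pvKey q).isPrefixOf (c :: t))
              = some ((h, tl), new) := by
            simp [List.find?, pvKey, hp]
          rw [hstep, ih _ _ hlen, pvScanL_cons_some _ _ _ _ hfind]
          simp [pvKey]
        · have hstep : PySem.Chars.replace.go (h :: tl) new (n+1) (c :: t) acc
              = PySem.Chars.replace.go (h :: tl) new n t (c :: acc) := by
            rw [PySem.Chars.replace.go]
            simp only [Bool.not_eq_true] at hp
            rw [hp]; simp
          have hfind : ([((h, tl), new)]).find? (fun q => (pvKey q).isPrefixOf (c :: t))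
              = none := by
            simp only [Bool.not_eq_true] at hp
            simp [List.find?, pvKey, hp]
          rw [hstep, ih _ _ (by simpa using hl), pvScanL_cons_none _ _ _ hfind]
          simp
  intro s
  unfold PySem.Chars.replace
  rw [if_neg (by simp)]
  rw [hgo s.length s [] le_rfl]
  simp

-- the four-key scan is exactly port B's pvSubst
lemma pvKeyP1 : pvKey pvP1 = pvK1 := rfl
lemma pvKeyP2 : pvKey pvP2 = pvK2 := rfl
lemma pvKeyP3 : pvKey pvP3 = pvK3 := rfl
lemma pvKeyP4 : pvKey pvP4 = pvK4 := rfl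

lemma pvScanL_four (s : List Char) : pvScanL [pvP1, pvP2, pvP3, pvP4] s = pvSubst s := by
  have main : ∀ n (s : List Char), s.length ≤ n → pvScanL [pvP1, pvP2, pvP3, pvP4] s = pvSubst s := by
    intro n
    induction n with
    | zero =>
      intro s hs
      have hnil : s = [] := List.eq_nil_of_length_eq_zero (by omega)
      subst hnil; rw [pvScanL_nil, pvSubst]
    | succ n ih =>
      intro s hs
      match s with
      | [] => rw [pvScanL_nil, pvSubst]
      | c :: t =>
        rw [pvSubst]
        by_cases h1 : pvK1.isPrefixOf (c :: t) = true
        · rw [pvScanL_cons_some _ _ _ pvP1 (by simp [List.find?, pvKeyP1, h1])]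
          rw [pvKeyP1, ih _ (by simp [pvK1] at hs ⊢; omega), h1]
          simp [pvP1]
        · rw [if_neg (by simp [h1])]
          by_cases h2 : pvK2.isPrefixOf (c :: t) = true
          · rw [pvScanL_cons_some _ _ _ pvP2
              (by simp [List.find?, pvKeyP1, pvKeyP2, h1, h2])]
            rw [pvKeyP2, ih _ (by simp [pvK2] at hs ⊢; omega), if_pos (by simp [h2])]
            simp [pvP2]
          · rw [if_neg (by simp [h2])]
            by_cases h3 : pvK3.isPrefixOf (c :: t) = true
            · rw [pvScanL_cons_some _ _ _ pvP3
                (by simp [List.find?, pvKeyP1, pvKeyP2, pvKeyP3, h1, h2, h3])]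
              rw [pvKeyP3, ih _ (by simp [pvK3] at hs ⊢; omega), if_pos (by simp [h3])]
              simp [pvP3]
            · rw [if_neg (by simp [h3])]
              by_cases h4 : pvK4.isPrefixOf (c :: t) = true
              · rw [pvScanL_cons_some _ _ _ pvP4
                  (by simp [List.find?, pvKeyP1, pvKeyP2, pvKeyP3, pvKeyP4, h1, h2, h3, h4])]
                rw [pvKeyP4, ih _ (by simp [pvK4] at hs ⊢; omega), if_pos (by simp [h4])]
                simp [pvP4]
              · rw [if_neg (by simp [h4])]
                rw [pvScanL_cons_none _ _ _
                  (by simp [List.find?, pvKeyP1, pvKeyP2, pvKeyP3, pvKeyP4, h1, h2, h3, h4])]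
                rw [ih _ (by simpa using hs)]
  exact main s.length s le_rfl

lemma pvStep2 : ∀ s, pvScanL [pvP2] (pvScanL [pvP1] s) = pvScanL [pvP1, pvP2] s := by
  intro s
  have h := pvScanL_step [pvP1] pvP2
    (fun p' hp' w hw hne =>
      (by decide : ∀ p' ∈ [pvP1], ∀ w ∈ (pvKey pvP2).tails, w ≠ [] →
        pvMis w (pvKey p') = true ∧ pvMis w p'.2 = true) p' hp' w ((List.mem_tails w _).2 hw) hne)
    (fun p' hp' q hq hne =>
      (by decide : ∀ p' ∈ [pvP1], ∀ q ∈ p'.2.tails, q ≠ [] →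
        pvMis (pvKey pvP2) q = true) p' hp' q ((List.mem_tails q _).2 hq) hne)
    (fun q hq hne p' hp' =>
      (by decide : ∀ q ∈ (pvKey pvP2).tails, q ≠ [] → ∀ p' ∈ [pvP1],
        pvMis (pvKey p') q = true) q ((List.mem_tails q _).2 hq) hne p' hp')
    s
  simpa using h

lemma pvStep3 : ∀ s, pvScanL [pvP3] (pvScanL [pvP1, pvP2] s) = pvScanL [pvP1, pvP2, pvP3] s := by
  intro s
  have h := pvScanL_step [pvP1, pvP2] pvP3
    (fun p' hp' w hw hne =>
      (by decide : ∀ p' ∈ [pvP1, pvP2], ∀ w ∈ (pvKey pvP3).tails, w ≠ [] →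
        pvMis w (pvKey p') = true ∧ pvMis w p'.2 = true) p' hp' w ((List.mem_tails w _).2 hw) hne)
    (fun p' hp' q hq hne =>
      (by decide : ∀ p' ∈ [pvP1, pvP2], ∀ q ∈ p'.2.tails, q ≠ [] →
        pvMis (pvKey pvP3) q = true) p' hp' q ((List.mem_tails q _).2 hq) hne)
    (fun q hq hne p' hp' =>
      (by decide : ∀ q ∈ (pvKey pvP3).tails, q ≠ [] → ∀ p' ∈ [pvP1, pvP2],
        pvMis (pvKey p') q = true) q ((List.mem_tails q _).2 hq) hne p' hp')
    s
  simpa using h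

lemma pvStep4 : ∀ s, pvScanL [pvP4] (pvScanL [pvP1, pvP2, pvP3] s) = pvScanL [pvP1, pvP2, pvP3, pvP4] s := by
  intro s
  have h := pvScanL_step [pvP1, pvP2, pvP3] pvP4
    (fun p' hp' w hw hne =>
      (by decide : ∀ p' ∈ [pvP1, pvP2, pvP3], ∀ w ∈ (pvKey pvP4).tails, w ≠ [] →
        pvMis w (pvKey p') = true ∧ pvMis w p'.2 = true) p' hp' w ((List.mem_tails w _).2 hw) hne)
    (fun p' hp' q hq hne =>
      (by decide : ∀ p' ∈ [pvP1, pvP2, pvP3], ∀ q ∈ p'.2.tails, q ≠ [] →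
        pvMis (pvKey pvP4) q = true) p' hp' q ((List.mem_tails q _).2 hq) hne)
    (fun q hq hne p' hp' =>
      (by decide : ∀ q ∈ (pvKey pvP4).tails, q ≠ [] → ∀ p' ∈ [pvP1, pvP2, pvP3],
        pvMis (pvKey p') q = true) q ((List.mem_tails q _).2 hq) hne p' hp')
    s
  simpa using h

-- the four sequential replaces equal port B's single scan, at the character level
lemma pvChain (cs : List Char) :
    PySem.Chars.replace (PySem.Chars.replace (PySem.Chars.replace
      (PySem.Chars.replace cs pvK1 pvV1) pvK2 pvV2) pvK3 pvV3) pvK4 pvV4 = pvSubst cs := by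
  rw [show pvK1 = '{' :: pvK1.tail from rfl, pvReplace_eq_scan,
    show pvK2 = '{' :: pvK2.tail from rfl, pvReplace_eq_scan,
    show pvK3 = '{' :: pvK3.tail from rfl, pvReplace_eq_scan,
    show pvK4 = '{' :: pvK4.tail from rfl, pvReplace_eq_scan]
  show pvScanL [pvP4] (pvScanL [pvP3] (pvScanL [pvP2] (pvScanL [pvP1] cs))) = pvSubst cs
  rw [pvStep2, pvStep3, pvStep4, pvScanL_four]

lemma pvStr_chain (u : String) :
    PySem.Str.replace (PySem.Str.replace (PySem.Str.replace (PySem.Str.replace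
      u "{{placement}}" "ig_stories")
      "{{campaign.name}}" "SALES_CBO_SummerPromo_20260325")
      "{{adset.name}}" "SumPro_US-25-45_A")
      "{{ad.name}}" "SumPro-A_hero-video_sq_v1"
    = String.ofList (pvSubst u.toList) := by
  unfold PySem.Str.replace
  simp only [String.toList_ofList]
  rw [show "{{placement}}".toList = pvK1 from rfl, show "ig_stories".toList = pvV1 from rfl,
    show "{{campaign.name}}".toList = pvK2 from rfl,
    show "SALES_CBO_SummerPromo_20260325".toList = pvV2 from rfl,
    show "{{adset.name}}".toList = pvK3 from rfl, show "SumPro_US-25-45_A".toList = pvV3 from rfl,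
    show "{{ad.name}}".toList = pvK4 from rfl,
    show "SumPro-A_hero-video_sq_v1".toList = pvV4 from rfl]
  exact congrArg String.ofList (pvChain u.toList)

-- ===== VERDICT (by name: the statement is the Claim_ definition above) =====
theorem preview_utm_url_spec : Claim_equal_preview_utm_url := by
  intro base_url url_tags _hdom
  unfold Spec_preview_utm_url preview_utm_url preview_utm_url_alt
  simp only [pvReps, List.foldl, pvStr_chain]
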